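-- pv_equiv track=rewrite | github.com/CymLearn/nlp_learn | NLP202505_20260327/code0313/位置编码/code/05_alibi.py | compute_bias
-- ===== SOURCE A (Python) =====
-- from typing import List
--
-- def compute_bias(seq_len: int) -> List[List[float]]:
--     """
--     计算 Attention 偏置矩阵
--
--     参数:
--         seq_len: 序列长度
--
--     返回:
--         偏置矩阵 [seq_len, seq_len]
--     """
--     bias_matrix = []
--
--     for i in range(seq_len):  # query 位置
--         row = []
--         for j in range(seq_len):  # key 位置
--             # 相对位置距离（因果掩码：只能看到过去）
--             if j <= i:
--                 distance = i - j
--             else: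
--                 distance = -1  # 未来位置（会被掩码）
--             row.append(distance)
--         bias_matrix.append(row)
--
--     return bias_matrix
-- ===== SOURCE B (Python) =====
-- def compute_bias(seq_len: int):
--     # Incremental construction: each row is derived from the previous row by
--     # prepending the new distance and dropping the last cell (a shift).
--     if seq_len <= 0:
--         return []
--     row = [0] + [-1] * (seq_len - 1)
--     bias_matrix = [row]
--     for i in range(1, seq_len):
--         row = [i] + row[:-1]
--         bias_matrix.append(row)
--     return bias_matrix
-- ===== Notes on version B (the rewrite author's own statement) =====
-- stated objective: alternative
-- what changed: B builds the matrix incrementally: it seeds the first row and derives each subsequent row from the previous one by prepending the new distance and dropping the last cell (a shift), instead of A's per-cell nested loop with its branch.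
import Mathlib
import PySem

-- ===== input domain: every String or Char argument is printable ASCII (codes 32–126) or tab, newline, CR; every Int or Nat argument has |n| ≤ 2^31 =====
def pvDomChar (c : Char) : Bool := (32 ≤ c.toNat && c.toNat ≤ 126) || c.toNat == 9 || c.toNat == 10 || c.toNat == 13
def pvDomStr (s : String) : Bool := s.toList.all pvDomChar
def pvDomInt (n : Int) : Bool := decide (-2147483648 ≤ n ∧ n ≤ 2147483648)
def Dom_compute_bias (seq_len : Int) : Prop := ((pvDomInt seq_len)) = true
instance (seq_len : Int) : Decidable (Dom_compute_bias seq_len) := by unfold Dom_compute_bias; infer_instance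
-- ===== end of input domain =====

-- B builds the matrix incrementally, deriving each row from the previous one by a shift
-- (prepend the new distance, drop the last cell) instead of A's per-cell branch; objective: alternative.

-- ===== PORT A =====
def compute_bias (seq_len : Int) : List (List Int) :=
  (PySem.List.pyRange 0 seq_len 1).foldl
    (fun bias_matrix i =>
      bias_matrix ++
        [(PySem.List.pyRange 0 seq_len 1).foldl
          (fun row j => row ++ [if j ≤ i then i - j else -1]) []])
    []

-- ===== PORT B =====
-- row[:-1] on a Python list is exactly List.dropLast
def compute_bias_alt (seq_len : Int) : List (List Int) :=
  if seq_len ≤ 0 then []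
  else
    let row0 : List Int := [0] ++ List.replicate (seq_len - 1).toNat (-1)
    ((PySem.List.pyRange 1 seq_len 1).foldl
      (fun (st : List (List Int) × List Int) i =>
        let row := [i] ++ st.2.dropLast
        (st.1 ++ [row], row))
      ([row0], row0)).1

-- ===== PRECONDITION & SPEC =====
def Spec_compute_bias (seq_len : Int) (out : List (List Int)) : Prop := out = compute_bias_alt seq_len
instance (seq_len : Int) (out : List (List Int)) : Decidable (Spec_compute_bias seq_len out) := by unfold Spec_compute_bias; infer_instance

-- ===== CLAIM (what is proved, stated in full; the proofs are below) =====
def Claim_equal_compute_bias : Prop := ∀ (seq_len : Int), Dom_compute_bias seq_len → Spec_compute_bias seq_len (compute_bias seq_len)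

-- ===== LEMMAS AND PROOFS =====

-- A's row for query position i.
def pvRow (n i : Int) : List Int :=
  (PySem.List.pyRange 0 n 1).map (fun j => if j ≤ i then i - j else -1)

theorem pvRow_length (n i : Int) : (pvRow n i).length = n.toNat := by
  simp [pvRow, PySem.List.length_pyRange_one]

-- A equals the map of pvRow over the query positions.
theorem A_eq_map (n : Int) :
    compute_bias n = (PySem.List.pyRange 0 n 1).map (pvRow n) := by
  unfold compute_bias
  rw [PySem.List.foldl_congr_mem (g := fun bm i => bm ++ [pvRow n i])]
  · rw [PySem.List.foldl_append_singleton_eq_map, List.nil_append]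
  · intro bm i _
    rw [PySem.List.foldl_append_singleton_eq_map, List.nil_append]
    rfl

-- The seed row.
theorem pvRow_zero (n : Int) (hn : 0 < n) :
    pvRow n 0 = [0] ++ List.replicate (n - 1).toNat (-1) := by
  unfold pvRow
  rw [PySem.List.pyRange_one_cons (by omega)]
  simp only [List.map_cons, if_pos (le_refl (0:Int)), sub_self, List.singleton_append]
  congr 1
  have h : ∀ j ∈ PySem.List.pyRange (0+1) n 1, (if j ≤ (0:Int) then 0 - j else -1) = -1 := by
    intro j hj
    rw [PySem.List.mem_pyRange_one] at hj
    rw [if_neg (by omega)]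
  rw [List.map_congr_left h, List.map_const', PySem.List.length_pyRange_one]
  congr 2

-- The shift step: the next row is the new distance prepended to the previous row without its last cell.
theorem pvRow_succ (n i : Int) (h0 : 0 ≤ i) (hn : 0 < n) :
    pvRow n (i + 1) = [i + 1] ++ (pvRow n i).dropLast := by
  apply List.ext_getElem
  · simp [pvRow_length, List.length_dropLast]; omega
  · intro k hk1 hk2
    simp only [pvRow_length] at hk1
    simp only [pvRow, List.getElem_map, PySem.List.getElem_pyRange_one, List.singleton_append]
    rcases Nat.eq_zero_or_pos k with hk0 | hkpos
    · subst hk0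
      simp
      omega
    · obtain ⟨k', rfl⟩ : ∃ k', k = k' + 1 := ⟨k - 1, by omega⟩
      rw [List.getElem_cons_succ, List.getElem_dropLast,
          List.getElem_map, PySem.List.getElem_pyRange_one]
      have : ((0:Int) + ↑(k' + 1) ≤ i + 1) ↔ ((0:Int) + ↑k' ≤ i) := by push_cast; omega
      by_cases hle : (0:Int) + ↑k' ≤ i
      · rw [if_pos (this.mpr hle), if_pos hle]; push_cast; omega
      · rw [if_neg (fun hc => hle (this.mp hc)), if_neg hle]

-- Fold invariant for B's loop.
theorem B_fold_inv (n : Int) (hn : 0 < n) (k : Nat) (hk : (1:Int) + k ≤ n) :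
    (PySem.List.pyRange 1 (1 + k) 1).foldl
      (fun (st : List (List Int) × List Int) i =>
        let row := [i] ++ st.2.dropLast
        (st.1 ++ [row], row))
      ([pvRow n 0], pvRow n 0)
    = ((PySem.List.pyRange 0 (1 + k) 1).map (pvRow n), pvRow n k) := by
  induction k with
  | zero =>
    have h1 : PySem.List.pyRange 0 1 1 = [(0:Int)] := by
      have := PySem.List.pyRange_one_singleton (a := (0:Int))
      simpa using this
    simp [h1]
  | succ m ih =>
    have hm : (1:Int) + m ≤ n := by push_cast at hk ⊢; omega
    have h1 : (1:Int) + ↑(m + 1) = (1 + ↑m) + 1 := by push_cast; ring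
    rw [h1, PySem.List.pyRange_one_succ_right (by omega), List.foldl_append, ih hm,
        PySem.List.pyRange_one_succ_right (by omega), List.map_append]
    simp only [List.foldl_cons, List.foldl_nil, List.map]
    push_cast
    rw [add_comm (1:Int) (m:Int)]
    rw [← pvRow_succ n m (by positivity) hn]

-- ===== VERDICT (by name: the statement is the Claim_ definition above) =====
theorem compute_bias_spec : Claim_equal_compute_bias := by
  intro n _
  unfold Spec_compute_bias
  rw [A_eq_map]
  unfold compute_bias_alt
  by_cases hn : n ≤ 0
  · rw [if_pos hn, PySem.List.pyRange_one_eq_nil (by omega), List.map_nil]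
  · rw [if_neg hn]
    have hn' : 0 < n := by omega
    have hrow0 : [(0:Int)] ++ List.replicate (n - 1).toNat (-1) = pvRow n 0 :=
      (pvRow_zero n hn').symm
    simp only [hrow0]
    rw [show n = 1 + ((n-1).toNat : Int) from (by omega)]
    rw [B_fold_inv (1 + ((n-1).toNat : Int)) (by omega) (n-1).toNat (by omega)]
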